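-- pv_equiv track=rewrite | github.com/EugeneMMF/leetcode | n-repeated-element-in-size-2n-array.py | repeatedNTimes
-- ===== SOURCE A (Python) =====
-- def repeatedNTimes(nums: list[int]) -> int:
--     counts = {}
--     for num in nums:
--         counts[num] = counts.get(num, 0) + 1
--
--     n = len(nums) // 2
--
--     for num, count in counts.items():
--         if count == n:
--             return num
--     return -1
-- ===== SOURCE B (Python) =====
-- def repeatedNTimes(nums: list[int]) -> int:
--     n = len(nums) // 2
--     for num in nums:
--         if nums.count(num) == n:
--             return num
--     return -1
-- ===== Notes on version B (the rewrite author's own statement) =====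
-- stated objective: simpler
-- what changed: Drops the frequency dictionary entirely: B computes n = len(nums)//2 and scans nums in order, returning the first element whose nums.count equals n, instead of building a counts dict and then scanning its items.
import Mathlib
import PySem

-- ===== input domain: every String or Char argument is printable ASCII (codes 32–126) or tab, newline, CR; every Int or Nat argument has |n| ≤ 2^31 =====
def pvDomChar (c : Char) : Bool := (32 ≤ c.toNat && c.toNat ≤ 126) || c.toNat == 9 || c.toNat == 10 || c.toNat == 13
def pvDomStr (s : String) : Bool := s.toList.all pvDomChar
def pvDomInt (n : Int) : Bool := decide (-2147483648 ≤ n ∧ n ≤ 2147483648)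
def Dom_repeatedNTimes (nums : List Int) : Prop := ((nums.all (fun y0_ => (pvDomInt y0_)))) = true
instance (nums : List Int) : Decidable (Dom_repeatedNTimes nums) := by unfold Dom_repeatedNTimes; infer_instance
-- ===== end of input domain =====

-- B drops A's count-dictionary: it scans nums in order and returns the first element
-- whose nums.count equals len(nums)//2 (same return value; simpler, not faster).
-- ===== PORT A =====
-- the 'for num, count in counts.items(): if count == n: return num' loop
def repeatedNTimesLoopA (n : Int) : List (Int × Int) → Int
  | [] => -1
  | (num, count) :: rest => if count = n then num else repeatedNTimesLoopA n rest

def repeatedNTimes (nums : List Int) : Int :=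
  let counts := nums.foldl (fun d x => d.insert x (d.getD x 0 + 1)) PySem.Dict.empty
  let n : Int := PySem.Int.floordiv (nums.length : Int) 2
  repeatedNTimesLoopA n counts.items

-- ===== PORT B =====
-- the 'for num in nums: if nums.count(num) == n: return num' loop
def repeatedNTimesLoopB (nums : List Int) (n : Int) : List Int → Int
  | [] => -1
  | num :: rest => if (nums.count num : Int) = n then num else repeatedNTimesLoopB nums n rest

def repeatedNTimes_alt (nums : List Int) : Int :=
  let n : Int := PySem.Int.floordiv (nums.length : Int) 2
  repeatedNTimesLoopB nums n nums

-- ===== PRECONDITION & SPEC =====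
def Spec_repeatedNTimes (nums : List Int) (out : Int) : Prop := out = repeatedNTimes_alt nums
instance (nums : List Int) (out : Int) : Decidable (Spec_repeatedNTimes nums out) := by unfold Spec_repeatedNTimes; infer_instance

-- ===== CLAIM (what is proved, stated in full; the proofs are below) =====
def Claim_equal_repeatedNTimes : Prop := ∀ (nums : List Int), Dom_repeatedNTimes nums → Spec_repeatedNTimes nums (repeatedNTimes nums)

-- ===== LEMMAS AND PROOFS =====

-- ===== VERDICT (by name: the statement is the Claim_ definition above) =====
-- find?-form of B's loop
lemma loopB_eq_find? (nums : List Int) (n : Int) (l : List Int) :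
    repeatedNTimesLoopB nums n l
      = (l.find? (fun x => ((nums.count x : Int) == n))).getD (-1) := by
  induction l with
  | nil => rfl
  | cons x rest ih =>
      by_cases h : (nums.count x : Int) = n
      · simp [repeatedNTimesLoopB, List.find?, h]
      · have hb : (((nums.count x : Nat) : Int) == n) = false := by simpa using h
        simp [repeatedNTimesLoopB, List.find?, h, hb, ih]

-- find? over the first-occurrence dedup equals find? over the list itself
lemma find?_ofList (p : Int → Bool) (l : List Int) :
    (PySem.Set.ofList l).find? p = l.find? p := by
  induction l using List.reverseRecOn with
  | nil => simp [PySem.Set.ofList_nil]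
  | append_singleton l x ih =>
      rw [PySem.Set.ofList_append_singleton, PySem.Set.add_eq_ite]
      cases hf : l.find? p with
      | some y =>
          have h1 : (PySem.Set.ofList l).find? p = some y := ih ▸ hf
          split_ifs with hm <;> simp [List.find?_append, h1, hf]
      | none =>
          have hnone : ∀ x ∈ l, ¬ p x := by
            intro a ha hpa
            exact (List.find?_eq_none.mp hf a ha) hpa
          split_ifs with hm
          · have hx : x ∈ l := (PySem.Set.mem_ofList l x).mp hm
            have hpx : ¬ p x := hnone x hx
            simp [ih, hf, List.find?_append, hpx]
          · simp [List.find?_append, ih, hf]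

-- A's items-loop over the counter items is B's loop over the dedup'd keys
lemma loopA_map (nums : List Int) (n : Int) (l : List Int) :
    repeatedNTimesLoopA n (l.map (fun k => (k, (nums.count k : Int))))
      = repeatedNTimesLoopB nums n l := by
  induction l with
  | nil => rfl
  | cons k rest ih =>
      by_cases h : (nums.count k : Int) = n <;>
        simp [repeatedNTimesLoopA, repeatedNTimesLoopB, h, ih]

theorem repeatedNTimes_spec : Claim_equal_repeatedNTimes := by
  intro nums _
  unfold Spec_repeatedNTimes repeatedNTimes repeatedNTimes_alt
  simp only [PySem.Dict.foldl_insert_getD_add_one_eq_counter, PySem.Dict.items_counter,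
    loopA_map, loopB_eq_find?, find?_ofList]
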